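-- pv_equiv track=rewrite | github.com/Pooryamb/circTAIL | A6p_template/scripts/AlignmentSplitter.py | LocationOfNthNuc
-- ===== SOURCE A (Python) =====
-- def LocationOfNthNuc(read, loc):
--     NoOfNonGapNucs = 0
--     NumOfLets2Read = 0
--     while NoOfNonGapNucs != loc:
--         if read[NumOfLets2Read]!= "-":
--             NoOfNonGapNucs += 1
--         NumOfLets2Read += 1
--     return NumOfLets2Read
-- ===== SOURCE B (Python) =====
-- def LocationOfNthNuc(read, loc):
--     # one pass builds an index table: ends[k] = index just past the k-th non-gap char
--     ends = [0] + [i + 1 for i, c in enumerate(read) if c != "-"]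
--     return ends[loc]
-- ===== Notes on version B (the rewrite author's own statement) =====
-- stated objective: alternative
-- what changed: Replaces the count-until-target while loop with a one-pass enumerate/filter index table (ends[k] = position after the k-th non-gap char) followed by a single lookup ends[loc].
import Mathlib
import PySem

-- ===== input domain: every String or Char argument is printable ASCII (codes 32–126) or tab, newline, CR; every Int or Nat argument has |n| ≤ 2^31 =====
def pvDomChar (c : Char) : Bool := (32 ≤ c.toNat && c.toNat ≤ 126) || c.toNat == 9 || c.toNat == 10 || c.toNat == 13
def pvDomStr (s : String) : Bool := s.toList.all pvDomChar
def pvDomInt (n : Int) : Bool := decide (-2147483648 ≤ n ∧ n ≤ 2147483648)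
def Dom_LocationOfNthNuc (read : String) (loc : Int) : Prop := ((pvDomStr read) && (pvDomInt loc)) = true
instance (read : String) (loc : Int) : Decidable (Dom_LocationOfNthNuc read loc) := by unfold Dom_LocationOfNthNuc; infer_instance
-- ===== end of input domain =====

-- B replaces A's count-until-target scan by a one-pass enumerate/filter index table plus one lookup; equivalence proved on Pre_ (0 ≤ loc ≤ number of non-gap characters, exactly where A returns).

-- ===== PORT A =====
-- the while loop of A: state (remaining chars, target loc, NoOfNonGapNucs, NumOfLets2Read);
-- the [] branch is where Python's read[NumOfLets2Read] raises IndexError (outside Pre_)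
def pvLoopA : List Char → Int → Int → Int → Int
  | cs, loc, cnt, pos =>
    if cnt = loc then pos
    else
      match cs with
      | [] => pos
      | c :: rest => pvLoopA rest loc (if c ≠ '-' then cnt + 1 else cnt) (pos + 1)

def LocationOfNthNuc (read : String) (loc : Int) : Int :=
  pvLoopA read.toList loc 0 0

-- ===== PORT B =====
-- [i + 1 for i, c in enumerate(read) if c != "-"] with enumerate start s
def pvEnds (cs : List Char) (s : Int) : List Int :=
  ((PySem.List.enumerate cs s).filter (fun p => p.2 != '-')).map (fun p => p.1 + 1)

def LocationOfNthNuc_alt (read : String) (loc : Int) : Int :=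
  (PySem.List.pyGet? (0 :: pvEnds read.toList 0) loc).getD 0

-- ===== PRECONDITION & SPEC =====
-- Pre_: exactly where A returns; outside it (loc < 0 or loc > number of non-gap chars) A raises IndexError.
def Pre_LocationOfNthNuc (read : String) (loc : Int) : Prop :=
  0 ≤ loc ∧ loc ≤ ((read.toList.filter (fun c => c != '-')).length : Int)
instance (read : String) (loc : Int) : Decidable (Pre_LocationOfNthNuc read loc) := by unfold Pre_LocationOfNthNuc; infer_instance
def pvWitness_LocationOfNthNuc : String × Int := ("a-b-c", 2)

def Spec_LocationOfNthNuc (read : String) (loc : Int) (out : Int) : Prop := out = LocationOfNthNuc_alt read loc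
instance (read : String) (loc : Int) (out : Int) : Decidable (Spec_LocationOfNthNuc read loc out) := by unfold Spec_LocationOfNthNuc; infer_instance

-- ===== CLAIM (what is proved, stated in full; the proofs are below) =====
def Claim_equal_LocationOfNthNuc : Prop := ∀ (read : String) (loc : Int), Dom_LocationOfNthNuc read loc → Pre_LocationOfNthNuc read loc → Spec_LocationOfNthNuc read loc (LocationOfNthNuc read loc)

-- ===== LEMMAS AND PROOFS =====

-- the position accumulator only adds an offset
lemma pvLoopA_pos (cs : List Char) : ∀ (loc cnt pos : Int),
    pvLoopA cs loc cnt pos = pos + pvLoopA cs loc cnt 0 := by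
  induction cs with
  | nil => intro loc cnt pos; by_cases h : cnt = loc <;> simp [pvLoopA, h]
  | cons c rest ih =>
    intro loc cnt pos
    by_cases h : cnt = loc
    · simp [pvLoopA, h]
    · simp only [pvLoopA, if_neg h]
      rw [ih loc _ (pos+1), ih loc _ (0+1)]
      ring

-- the loop depends only on loc - cnt
lemma pvLoopA_shift (cs : List Char) : ∀ (loc cnt pos : Int),
    pvLoopA cs loc cnt pos = pvLoopA cs (loc - cnt) 0 pos := by
  induction cs with
  | nil =>
    intro loc cnt pos
    by_cases h : cnt = loc
    · simp [pvLoopA, h]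
    · rw [pvLoopA, pvLoopA, if_neg h, if_neg (by omega)]
  | cons c rest ih =>
    intro loc cnt pos
    by_cases h : cnt = loc
    · simp [pvLoopA, h]
    · rw [pvLoopA, pvLoopA, if_neg h, if_neg (show (0:Int) ≠ loc - cnt by omega)]
      by_cases hc : c ≠ '-'
      · simp only [if_pos hc]
        rw [ih loc (cnt+1) (pos+1), ih (loc - cnt) (0+1) (pos+1)]
        congr 1; ring
      · simp only [if_neg hc]
        rw [ih loc cnt (pos+1), ih (loc - cnt) 0 (pos+1)]

lemma pvEnds_cons (c : Char) (rest : List Char) (s : Int) :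
    pvEnds (c :: rest) s =
      (if c != '-' then [s + 1] else []) ++ pvEnds rest (s + 1) := by
  by_cases h : c != '-' <;>
    simp [pvEnds, PySem.List.enumerate_cons, h]

lemma pvEnds_shift (cs : List Char) : ∀ (s t : Int),
    pvEnds cs (t + s) = (pvEnds cs s).map (fun x => t + x) := by
  induction cs with
  | nil => intro s t; simp [pvEnds, PySem.List.enumerate_nil]
  | cons c rest ih =>
    intro s t
    rw [pvEnds_cons, pvEnds_cons]
    have : t + s + 1 = t + (s + 1) := by ring
    rw [this, ih (s + 1) t]
    by_cases h : c != '-' <;> simp [h]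

lemma pvEnds_length (cs : List Char) (s : Int) :
    (pvEnds cs s).length = (cs.filter (fun c => c != '-')).length := by
  induction cs generalizing s with
  | nil => simp [pvEnds, PySem.List.enumerate_nil]
  | cons c rest ih =>
    rw [pvEnds_cons]
    by_cases h : c != '-' <;> simp [h, ih]

-- main invariant: the loop result is the table lookup
lemma pv_main (cs : List Char) : ∀ (n : Nat),
    n ≤ (cs.filter (fun c => c != '-')).length →
    pvLoopA cs (n : Int) 0 0 = ((0 :: pvEnds cs 0)[n]?).getD 0 := by
  induction cs with
  | nil =>
    intro n hn
    simp at hn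
    subst hn
    simp [pvLoopA]
  | cons c rest ih =>
    intro n hn
    match n with
    | 0 => simp [pvLoopA]
    | Nat.succ m =>
      rw [Nat.succ_eq_add_one]
      have hne : (0 : Int) ≠ ((m + 1 : Nat) : Int) := by push_cast; omega
      rw [pvLoopA, if_neg hne]
      simp only [zero_add]
      by_cases hc : c ≠ '-'
      · simp only [if_pos hc]
        have hm : m ≤ (rest.filter (fun c => c != '-')).length := by
          have : (List.filter (fun c => c != '-') (c :: rest)).length
              = (rest.filter (fun c => c != '-')).length + 1 := by
            simp [hc]
          omega
        have h1 : pvLoopA rest ((m + 1 : Nat) : Int) 1 1 = 1 + pvLoopA rest ((m : Nat) : Int) 0 0 := by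
          rw [pvLoopA_shift, pvLoopA_pos]
          have : ((m + 1 : Nat) : Int) - 1 = ((m : Nat) : Int) := by push_cast; ring
          rw [this]
        rw [h1, ih m hm]
        -- right-hand side
        rw [pvEnds_cons, if_pos (by simpa using hc)]
        simp only [zero_add]
        have h2 : pvEnds rest 1 = (pvEnds rest 0).map (fun x => 1 + x) := by
          simpa using pvEnds_shift rest 0 1
        rw [h2]
        have hcons : ((0 : Int) :: ([(1:Int)] ++ (pvEnds rest 0).map (fun x => 1 + x)))[m+1]?
            = (((0:Int) :: pvEnds rest 0).map (fun x => 1 + x))[m]? := by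
          simp
        rw [hcons, List.getElem?_map]
        -- the lookup is in range, hence some
        have hlen : m < ((0:Int) :: pvEnds rest 0).length := by
          simp [pvEnds_length]; omega
        rw [List.getElem?_eq_getElem hlen]
        simp
      · simp only [if_neg hc]
        have hc' : c = '-' := by
          by_contra h; exact hc h
        have hm : m + 1 ≤ (rest.filter (fun c => c != '-')).length := by
          have : (List.filter (fun c => c != '-') (c :: rest)).length
              = (rest.filter (fun c => c != '-')).length := by
            simp [hc']
          omega
        have h1 : pvLoopA rest ((m + 1 : Nat) : Int) 0 1 = 1 + pvLoopA rest ((m + 1 : Nat) : Int) 0 0 := by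
          rw [pvLoopA_pos]
        rw [h1, ih (m + 1) hm]
        rw [pvEnds_cons, if_neg (by simp [hc'])]
        simp only [zero_add]
        have h2 : pvEnds rest 1 = (pvEnds rest 0).map (fun x => 1 + x) := by
          simpa using pvEnds_shift rest 0 1
        rw [h2]
        have hcons : ((0 : Int) :: ([] ++ (pvEnds rest 0).map (fun x => 1 + x)))[m+1]?
            = ((pvEnds rest 0).map (fun x => 1 + x))[m]? := by
          simp
        rw [hcons, List.getElem?_map]
        have hlen : m < (pvEnds rest 0).length := by
          rw [pvEnds_length]; omega
        rw [List.getElem?_eq_getElem hlen]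
        have hlen2 : m + 1 < ((0:Int) :: pvEnds rest 0).length := by
          simp [pvEnds_length]; omega
        rw [List.getElem?_eq_getElem hlen2]
        simp

-- ===== VERDICT (by name: the statement is the Claim_ definition above) =====
theorem LocationOfNthNuc_spec : Claim_equal_LocationOfNthNuc := by
  intro read loc _ hpre
  obtain ⟨h0, hle⟩ := hpre
  unfold Spec_LocationOfNthNuc LocationOfNthNuc LocationOfNthNuc_alt
  rw [PySem.List.pyGet?_of_nonneg _ h0]
  have hn : loc = ((loc.toNat : Nat) : Int) := by omega
  have hb : loc.toNat ≤ (read.toList.filter (fun c => c != '-')).length := by omega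
  rw [hn]
  exact pv_main read.toList loc.toNat hb
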